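-- pv_equiv track=rewrite | github.com/mini2317/baeckjoon | ucpc 2023/I.py | maxBatteryEnergy
-- ===== SOURCE A (Python) =====
-- def maxBatteryEnergy(N, K, energy):
--     max_change = 0  # 배터리 에너지 변화의 최댓값을 저장하는 변수
--
--     # 자석의 크기를 2부터 N까지 변경하면서 최댓값을 구함
--     for size in range(2, N + 1):
--         total_energy = 0  # 배터리의 총 에너지 변화량을 저장하는 변수
--
--         # 자석의 N극과 S극이 놓인 칸의 인덱스 범위를 계산
--         start = 0
--         end = N - size
--
--         # 자석을 이동하며 배터리의 에너지 변화량을 계산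
--         for i in range(start, end + 1):
--             n_pole_energy = energy[i]  # N극이 놓인 칸의 에너지 상수
--             s_pole_energy = energy[i + size - 1]  # S극이 놓인 칸의 에너지 상수
--             diff_energy = (i + size - 1) - i  # N극과 S극의 번호 차이
--
--             # 배터리의 에너지 변화량 계산
--             energy_change = n_pole_energy + s_pole_energy - K * diff_energy
--             total_energy += energy_change
--
--         # 최댓값 갱신
--         max_change = max(max_change, total_energy)
--
--     return max_change
-- ===== SOURCE B (Python) =====
-- def maxBatteryEnergy(N, K, energy):
--     # Prefix sums: each size's window total is computed in O(1) from range sums.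
--     pre = [0]
--     s = 0
--     for x in energy[:N]:
--         s += x
--         pre.append(s)
--     best = 0
--     for size in range(2, N + 1):
--         m = N - size + 1  # number of magnet positions for this size
--         total = pre[m] + (pre[N] - pre[size - 1]) - K * (size - 1) * m
--         if total > best:
--             best = total
--     return best
-- ===== Notes on version B (the rewrite author's own statement) =====
-- stated objective: faster
-- what changed: Replaces A's inner loop over all magnet positions by a prefix-sum array, so each size's total is computed in O(1) from two range sums plus a closed-form penalty term.
import Mathlib
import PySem

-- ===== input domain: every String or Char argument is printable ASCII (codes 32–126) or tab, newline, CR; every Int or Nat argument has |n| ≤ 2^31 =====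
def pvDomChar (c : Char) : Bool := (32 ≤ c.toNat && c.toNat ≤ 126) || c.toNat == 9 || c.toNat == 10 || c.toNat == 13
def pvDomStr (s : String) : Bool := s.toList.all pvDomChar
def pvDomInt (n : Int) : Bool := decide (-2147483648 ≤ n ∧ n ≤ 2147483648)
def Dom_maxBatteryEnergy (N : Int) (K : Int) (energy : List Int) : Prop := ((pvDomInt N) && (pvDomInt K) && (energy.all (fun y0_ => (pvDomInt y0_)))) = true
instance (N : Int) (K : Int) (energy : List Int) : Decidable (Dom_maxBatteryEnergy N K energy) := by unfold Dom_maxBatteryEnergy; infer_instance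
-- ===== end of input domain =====

-- B replaces A's quadratic scan over all magnet positions by prefix sums: each
-- size's total is two range sums plus a closed-form penalty, computed in O(N) total.

-- ===== PORT A =====
def maxBatteryEnergy (N : Int) (K : Int) (energy : List Int) : Int :=
  (PySem.List.pyRange 2 (N + 1) 1).foldl
    (fun max_change size =>
      let total_energy :=
        (PySem.List.pyRange 0 ((N - size) + 1) 1).foldl
          (fun t i =>
            let n_pole_energy := PySem.List.pyGetD energy i 0
            let s_pole_energy := PySem.List.pyGetD energy (i + size - 1) 0
            let diff_energy := (i + size - 1) - i
            t + (n_pole_energy + s_pole_energy - K * diff_energy)) 0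
      max max_change total_energy) 0

-- ===== PORT B =====
def maxBatteryEnergy_alt (N : Int) (K : Int) (energy : List Int) : Int :=
  let ps := (PySem.List.slice energy none (some N)).foldl
      (fun (a : List Int × Int) x => (a.1 ++ [a.2 + x], a.2 + x)) ([0], 0)
  let pre := ps.1
  (PySem.List.pyRange 2 (N + 1) 1).foldl
    (fun best size =>
      let m := N - size + 1
      let total := PySem.List.pyGetD pre m 0
          + (PySem.List.pyGetD pre N 0 - PySem.List.pyGetD pre (size - 1) 0)
          - K * (size - 1) * m
      if total > best then total else best) 0

-- ===== PRECONDITION & SPEC =====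
-- A raises IndexError exactly when N ≥ 2 and energy has fewer than N elements.
def Pre_maxBatteryEnergy (N : Int) (K : Int) (energy : List Int) : Prop :=
  N ≤ 1 ∨ N ≤ (energy.length : Int)
instance (N : Int) (K : Int) (energy : List Int) : Decidable (Pre_maxBatteryEnergy N K energy) := by unfold Pre_maxBatteryEnergy; infer_instance
def pvWitness_maxBatteryEnergy : Int × Int × List Int := (3, 1, [1, 2, 3])

def Spec_maxBatteryEnergy (N : Int) (K : Int) (energy : List Int) (out : Int) : Prop := out = maxBatteryEnergy_alt N K energy
instance (N : Int) (K : Int) (energy : List Int) (out : Int) : Decidable (Spec_maxBatteryEnergy N K energy out) := by unfold Spec_maxBatteryEnergy; infer_instance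

-- ===== CLAIM (what is proved, stated in full; the proofs are below) =====
def Claim_equal_maxBatteryEnergy : Prop := ∀ (N : Int) (K : Int) (energy : List Int), Dom_maxBatteryEnergy N K energy → Pre_maxBatteryEnergy N K energy → Spec_maxBatteryEnergy N K energy (maxBatteryEnergy N K energy)

-- ===== LEMMAS AND PROOFS =====

-- the prefix-building fold of B, characterised
theorem presum_fold (e : List Int) (acc : List Int) (s : Int) :
    (e.foldl (fun (a : List Int × Int) x => (a.1 ++ [a.2 + x], a.2 + x)) (acc, s)).1
      = acc ++ (List.range e.length).map (fun j => s + (e.take (j + 1)).sum) := by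
  induction e generalizing acc s with
  | nil => simp
  | cons x rest ih =>
      simp only [List.foldl_cons, List.length_cons, List.range_succ_eq_map, List.map_cons,
        List.map_map]
      rw [ih]
      simp [List.append_assoc, Function.comp, add_assoc]

theorem pre_eq (e : List Int) :
    (e.foldl (fun (a : List Int × Int) x => (a.1 ++ [a.2 + x], a.2 + x)) (([0] : List Int), (0 : Int))).1
      = (List.range (e.length + 1)).map (fun j => (e.take j).sum) := by
  rw [presum_fold]
  rw [List.range_succ_eq_map, List.map_cons, List.map_map]
  simp [Function.comp]

-- A's inner loop as prefix sums
theorem innerSum (L : List Int) (K s : Int) (hs : 2 ≤ s) (m : Nat)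
    (hm : (m : Int) + s - 1 ≤ (L.length : Int)) :
    (PySem.List.pyRange 0 (m : Int) 1).foldl
      (fun t i =>
        let n_pole_energy := PySem.List.pyGetD L i 0
        let s_pole_energy := PySem.List.pyGetD L (i + s - 1) 0
        let diff_energy := (i + s - 1) - i
        t + (n_pole_energy + s_pole_energy - K * diff_energy)) 0
      = (L.take m).sum + ((L.take (m + (s - 1).toNat)).sum - (L.take (s - 1).toNat).sum)
        - K * (s - 1) * m := by
  induction m with
  | zero => simp [PySem.List.pyRange_one_eq_nil]
  | succ n ih =>
      have hm' : (n : Int) + s - 1 ≤ (L.length : Int) := by push_cast at hm ⊢; omega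
      have hrange : PySem.List.pyRange 0 ((n : Int) + 1) 1
          = PySem.List.pyRange 0 (n : Int) 1 ++ [(n : Int)] :=
        PySem.List.pyRange_one_succ_right (by positivity)
      have hn1 : n < L.length := by omega
      have hn2 : n + (s - 1).toNat < L.length := by omega
      have hidx : (n : Int) + s - 1 = ((n + (s - 1).toNat : Nat) : Int) := by
        push_cast; omega
      push_cast
      rw [hrange, List.foldl_append, ih hm']
      simp only [List.foldl_cons, List.foldl_nil]
      rw [hidx, PySem.List.pyGetD_natCast, PySem.List.pyGetD_natCast,
        List.getD_eq_getElem _ _ hn1, List.getD_eq_getElem _ _ hn2,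
        List.sum_take_succ _ _ hn1]
      have : n + (s - 1).toNat + 1 = (n + 1) + (s - 1).toNat := by omega
      rw [show (n + 1) + (s - 1).toNat = (n + (s - 1).toNat) + 1 by omega,
        List.sum_take_succ _ _ hn2]
      push_cast
      rw [Int.toNat_of_nonneg (show (0:Int) ≤ s - 1 by omega)]
      ring

-- A's inner loop with an Int bound
theorem innerSum' (L : List Int) (K s : Int) (hs : 2 ≤ s) (mI : Int) (h0 : 0 ≤ mI)
    (hm : mI + s - 1 ≤ (L.length : Int)) :
    (PySem.List.pyRange 0 mI 1).foldl
      (fun t i =>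
        let n_pole_energy := PySem.List.pyGetD L i 0
        let s_pole_energy := PySem.List.pyGetD L (i + s - 1) 0
        let diff_energy := (i + s - 1) - i
        t + (n_pole_energy + s_pole_energy - K * diff_energy)) 0
      = (L.take mI.toNat).sum + ((L.take (mI.toNat + (s - 1).toNat)).sum - (L.take (s - 1).toNat).sum)
        - K * (s - 1) * mI := by
  have h := innerSum L K s hs mI.toNat (by omega)
  rw [show ((mI.toNat : Nat) : Int) = mI from by omega] at h
  exact h

-- B's prefix list lookups
theorem pre_getD (L : List Int) (N : Int) (hN0 : 0 ≤ N) (hlen : N ≤ (L.length : Int))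
    (j : Int) (hj0 : 0 ≤ j) (hj : j ≤ N) :
    PySem.List.pyGetD
      ((PySem.List.slice L none (some N)).foldl
        (fun (a : List Int × Int) x => (a.1 ++ [a.2 + x], a.2 + x)) (([0] : List Int), (0 : Int))).1
      j 0 = (L.take j.toNat).sum := by
  rw [PySem.List.slice_to L hN0, pre_eq]
  have hlen' : (List.take N.toNat L).length = N.toNat := by
    rw [List.length_take]; omega
  have hj' : j = ((j.toNat : Nat) : Int) := by omega
  rw [hj', PySem.List.pyGetD_natCast]
  rw [hlen', PySem.List.getD_map_range _ _ _ _ (by omega)]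
  rw [List.take_take]
  have hmin : min j.toNat N.toNat = j.toNat := by omega
  simp only [hmin, Int.toNat_natCast]

-- ===== VERDICT (by name: the statement is the Claim_ definition above) =====
theorem maxBatteryEnergy_spec : Claim_equal_maxBatteryEnergy := by
  intro N K L _ hpre
  unfold Spec_maxBatteryEnergy maxBatteryEnergy maxBatteryEnergy_alt
  by_cases hN : N + 1 ≤ 2
  · rw [PySem.List.pyRange_one_eq_nil hN]
    simp
  · have h2 : 2 ≤ N := by omega
    have hlen : N ≤ (L.length : Int) := by
      rcases hpre with h | h
      · omega
      · exact h
    simp only []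
    apply PySem.List.foldl_congr_mem'
    intro s hs acc
    have hsr := (PySem.List.mem_pyRange_one).1 hs
    have hs2 : 2 ≤ s := hsr.1
    have hsN : s ≤ N := by omega
    rw [innerSum' L K s hs2 (N - s + 1) (by omega) (by omega)]
    rw [pre_getD L N (by omega) hlen (N - s + 1) (by omega) (by omega),
        pre_getD L N (by omega) hlen N (by omega) (by omega),
        pre_getD L N (by omega) hlen (s - 1) (by omega) (by omega)]
    rw [show (N - s + 1).toNat + (s - 1).toNat = N.toNat from by omega]
    rw [max_def]
    split_ifs <;> omega
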